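-- pv_equiv track=rewrite | github.com/innewiadro/Codewars | kata_level7/Tram_capacity/Tram_capacity.py | tram
-- ===== SOURCE A (Python) =====
-- def tram(stops, descending, onboarding):
--     current = 0
--     max_capacity = 0
--
--     for i in range(stops):
--         current -= descending[i]
--         current += onboarding[i]
--         max_capacity = max(max_capacity, current)
--
--     return max_capacity
-- ===== SOURCE B (Python) =====
-- def tram(stops, descending, onboarding):
--     # Right-to-left recurrence: the maximum (0-clamped) prefix sum P of the
--     # per-stop deltas satisfies P(x::rest) = max(0, x + P(rest)), P([]) = 0.
--     best = 0
--     for i in reversed(range(stops)):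
--         best = max(0, onboarding[i] - descending[i] + best)
--     return best
-- ===== Notes on version B (the rewrite author's own statement) =====
-- stated objective: alternative
-- what changed: Instead of a forward pass tracking the running occupancy and its running maximum, B processes stops right-to-left with the single recurrence best = max(0, delta[i] + best), using the identity that the clamped maximum prefix sum satisfies P(x::rest) = max(0, x + P(rest)); no running occupancy is ever maintained.
import Mathlib
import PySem

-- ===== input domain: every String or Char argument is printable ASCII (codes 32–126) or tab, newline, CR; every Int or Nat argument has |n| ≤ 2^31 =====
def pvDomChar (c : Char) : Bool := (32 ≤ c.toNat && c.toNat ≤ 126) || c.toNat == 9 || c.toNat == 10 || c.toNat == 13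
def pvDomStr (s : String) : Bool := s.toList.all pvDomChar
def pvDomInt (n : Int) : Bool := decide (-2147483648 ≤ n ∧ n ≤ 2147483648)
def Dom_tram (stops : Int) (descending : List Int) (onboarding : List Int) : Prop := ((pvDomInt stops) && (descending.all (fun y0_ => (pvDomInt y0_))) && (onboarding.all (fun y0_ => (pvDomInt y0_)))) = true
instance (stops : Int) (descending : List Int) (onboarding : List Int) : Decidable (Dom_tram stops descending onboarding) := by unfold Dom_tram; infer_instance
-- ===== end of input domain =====

-- B replaces A's forward pass (running occupancy + running max) by a right-to-left
-- recurrence best = max(0, delta[i] + best); alternative algorithm, same cost.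

-- ===== PORT A =====
-- single forward pass over range(stops), carrying (current, max_capacity)
def tram (stops : Int) (descending : List Int) (onboarding : List Int) : Int :=
  ((PySem.List.pyRange 0 stops 1).foldl
      (fun (st : Int × Int) i =>
        let current := st.1 - PySem.List.pyGetD descending i 0 + PySem.List.pyGetD onboarding i 0
        (current, max st.2 current))
      (0, 0)).2

-- ===== PORT B =====
-- best = 0; for i in reversed(range(stops)): best = max(0, onboarding[i]-descending[i]+best)
def tram_alt (stops : Int) (descending : List Int) (onboarding : List Int) : Int :=
  (PySem.List.pyRange 0 stops 1).reverse.foldl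
      (fun best i => max 0 (PySem.List.pyGetD onboarding i 0 - PySem.List.pyGetD descending i 0 + best))
      0

-- ===== PRECONDITION & SPEC =====
-- Pre_ excludes exactly the inputs where Python A raises IndexError: stops exceeding either list's length.
def Pre_tram (stops : Int) (descending : List Int) (onboarding : List Int) : Prop :=
  stops ≤ (descending.length : Int) ∧ stops ≤ (onboarding.length : Int)
instance (stops : Int) (descending : List Int) (onboarding : List Int) : Decidable (Pre_tram stops descending onboarding) := by unfold Pre_tram; infer_instance
def pvWitness_tram : Int × List Int × List Int := (3, [1, 0, 2], [2, 3, 0])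

def Spec_tram (stops : Int) (descending : List Int) (onboarding : List Int) (out : Int) : Prop := out = tram_alt stops descending onboarding
instance (stops : Int) (descending : List Int) (onboarding : List Int) (out : Int) : Decidable (Spec_tram stops descending onboarding out) := by unfold Spec_tram; infer_instance

-- ===== CLAIM (what is proved, stated in full; the proofs are below) =====
def Claim_equal_tram : Prop := ∀ (stops : Int) (descending : List Int) (onboarding : List Int), Dom_tram stops descending onboarding → Pre_tram stops descending onboarding → Spec_tram stops descending onboarding (tram stops descending onboarding)

-- ===== LEMMAS AND PROOFS =====

-- R d L: the backward recurrence (B's algorithm as a foldr)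
def tramR (d : Int → Int) (L : List Int) : Int :=
  L.foldr (fun i b => max 0 (d i + b)) 0

theorem tramR_nonneg (d : Int → Int) (L : List Int) : 0 ≤ tramR d L := by
  cases L with
  | nil => simp [tramR]
  | cons x t => simp [tramR]

-- A's fused forward loop, started at (c, m) with c ≤ m, equals max m (c + tramR d L)
theorem tram_loop_eq (d : Int → Int) (L : List Int) (c m : Int) (h : c ≤ m) :
    (L.foldl (fun (st : Int × Int) i => (st.1 + d i, max st.2 (st.1 + d i))) (c, m)).2
      = max m (c + tramR d L) := by
  induction L generalizing c m with
  | nil => simp [tramR]; omega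
  | cons x t ih =>
      simp only [List.foldl_cons]
      rw [ih (c + d x) (max m (c + d x)) (le_max_right _ _)]
      have hR := tramR_nonneg d t
      simp only [tramR] at hR ⊢
      simp only [List.foldr_cons]
      omega

-- ===== VERDICT (by name: the statement is the Claim_ definition above) =====
theorem tram_spec : Claim_equal_tram := by
  intro stops descending onboarding _ _
  unfold Spec_tram tram tram_alt
  have hfun : (fun (st : Int × Int) i =>
        let current := st.1 - PySem.List.pyGetD descending i 0 + PySem.List.pyGetD onboarding i 0
        (current, max st.2 current))
      = (fun (st : Int × Int) i =>
        (st.1 + (PySem.List.pyGetD onboarding i 0 - PySem.List.pyGetD descending i 0),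
         max st.2 (st.1 + (PySem.List.pyGetD onboarding i 0 - PySem.List.pyGetD descending i 0)))) := by
    funext st i
    have h : st.1 - PySem.List.pyGetD descending i 0 + PySem.List.pyGetD onboarding i 0
        = st.1 + (PySem.List.pyGetD onboarding i 0 - PySem.List.pyGetD descending i 0) := by ring
    simp only [h]
  rw [hfun, tram_loop_eq _ _ _ _ le_rfl, List.foldl_reverse]
  have hR := tramR_nonneg (fun i => PySem.List.pyGetD onboarding i 0 - PySem.List.pyGetD descending i 0) (PySem.List.pyRange 0 stops 1)
  simp only [tramR] at hR ⊢
  omega
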